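-- pv_equiv track=rewrite | github.com/tangjiewei0336/ascii_choir | bar_utils.py | _pipe_positions_at_depth_zero
-- ===== SOURCE A (Python) =====
-- def _pipe_positions_at_depth_zero(line: str) -> list[int]:
--     """
--     返回 line 中作为小节边界的 | 位置列表。
--     仅按方括号 [ ] 计深度：记号作用域 [8vb](|bar1|bar2|) 内的 | 仍为小节线；
--     圆括号 ( ) 用于和弦等，其内无 |，故不参与深度判断。
--     """
--     positions: list[int] = []
--     depth_bracket = 0
--     for i, c in enumerate(line):
--         if c == "[":
--             depth_bracket += 1
--         elif c == "]":
--             depth_bracket -= 1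
--         elif c == "|" and depth_bracket == 0:
--             positions.append(i)
--     return positions
-- ===== SOURCE B (Python) =====
-- def _pipe_positions_at_depth_zero(line: str) -> list[int]:
--     # Two-phase: build the exclusive prefix bracket-depth table, then filter pipes.
--     depths = [0]
--     d = 0
--     for c in line:
--         d += 1 if c == "[" else -1 if c == "]" else 0
--         depths.append(d)
--     return [i for i, (c, d) in enumerate(zip(line, depths)) if c == "|" and d == 0]
-- ===== Notes on version B (the rewrite author's own statement) =====
-- stated objective: alternative
-- what changed: Replaces the single fused scan with a running counter by a two-phase structure: first materialize the exclusive prefix bracket-depth table, then a comprehension filters the pipe positions whose prefix depth is zero.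
import Mathlib
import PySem

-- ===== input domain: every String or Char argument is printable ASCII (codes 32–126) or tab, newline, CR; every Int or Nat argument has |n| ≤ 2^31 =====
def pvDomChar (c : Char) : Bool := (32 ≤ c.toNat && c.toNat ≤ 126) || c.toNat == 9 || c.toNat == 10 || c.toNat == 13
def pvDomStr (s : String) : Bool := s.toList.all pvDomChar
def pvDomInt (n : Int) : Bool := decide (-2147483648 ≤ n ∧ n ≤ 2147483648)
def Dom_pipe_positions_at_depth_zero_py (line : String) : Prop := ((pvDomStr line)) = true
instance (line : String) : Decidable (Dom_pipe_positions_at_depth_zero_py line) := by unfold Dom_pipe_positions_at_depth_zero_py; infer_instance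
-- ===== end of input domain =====

-- B replaces A's fused scan with a two-phase prefix-depth table + filter; same O(n) cost, proved equal on all inputs.

-- ===== PORT A =====
def pipe_positions_at_depth_zero_py (line : String) : List Int :=
  ((PySem.List.enumerate line.toList 0).foldl
    (fun (st : List Int × Int) (p : Int × Char) =>
      if p.2 = '[' then (st.1, st.2 + 1)
      else if p.2 = ']' then (st.1, st.2 - 1)
      else if p.2 = '|' ∧ st.2 = 0 then (st.1 ++ [p.1], st.2)
      else st)
    ([], 0)).1

-- ===== PORT B =====
def pvDelta (c : Char) : Int := if c = '[' then 1 else if c = ']' then -1 else 0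

def pipe_positions_at_depth_zero_py_alt (line : String) : List Int :=
  let cs := line.toList
  let depths := (cs.foldl
    (fun (st : List Int × Int) c =>
      let d := st.2 + pvDelta c
      (st.1 ++ [d], d))
    ([(0 : Int)], 0)).1
  (PySem.List.enumerate (cs.zip depths) 0).filterMap
    (fun p => if p.2.1 = '|' ∧ p.2.2 = 0 then some p.1 else none)

-- ===== PRECONDITION & SPEC =====
def Spec_pipe_positions_at_depth_zero_py (line : String) (out : List Int) : Prop := out = pipe_positions_at_depth_zero_py_alt line
instance (line : String) (out : List Int) : Decidable (Spec_pipe_positions_at_depth_zero_py line out) := by unfold Spec_pipe_positions_at_depth_zero_py; infer_instance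

-- ===== CLAIM (what is proved, stated in full; the proofs are below) =====
def Claim_equal_pipe_positions_at_depth_zero_py : Prop := ∀ (line : String), Dom_pipe_positions_at_depth_zero_py line → Spec_pipe_positions_at_depth_zero_py line (pipe_positions_at_depth_zero_py line)

-- ===== LEMMAS AND PROOFS =====

-- common recursive characterisation of the result
def pvGo : List Char → Int → Int → List Int
  | [], _, _ => []
  | c :: cs, i, d =>
    if c = '[' then pvGo cs (i+1) (d+1)
    else if c = ']' then pvGo cs (i+1) (d-1)
    else if c = '|' ∧ d = 0 then i :: pvGo cs (i+1) d
    else pvGo cs (i+1) d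

-- inclusive prefix-depth sums
def pvScan : List Char → Int → List Int
  | [], _ => []
  | c :: cs, d => (d + pvDelta c) :: pvScan cs (d + pvDelta c)

theorem pvFoldA_eq_go (cs : List Char) : ∀ (ps : List Int) (i d : Int),
    ((PySem.List.enumerate cs i).foldl
      (fun (st : List Int × Int) (p : Int × Char) =>
        if p.2 = '[' then (st.1, st.2 + 1)
        else if p.2 = ']' then (st.1, st.2 - 1)
        else if p.2 = '|' ∧ st.2 = 0 then (st.1 ++ [p.1], st.2)
        else st)
      (ps, d)).1 = ps ++ pvGo cs i d := by
  induction cs with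
  | nil => intro ps i d; simp [PySem.List.enumerate_nil, pvGo]
  | cons c cs ih =>
    intro ps i d
    rw [PySem.List.enumerate_cons]
    simp only [List.foldl_cons, pvGo]
    by_cases h1 : c = '['
    · simp [h1, ih]
    · by_cases h2 : c = ']'
      · simp [h1, h2, ih]
      · by_cases h3 : c = '|' ∧ d = 0
        · simp [h1, h2, h3, ih]
        · simp [h1, h2, h3, ih]

theorem pvFoldB_eq_scan (cs : List Char) : ∀ (ps : List Int) (d : Int),
    (cs.foldl
      (fun (st : List Int × Int) c =>
        let d := st.2 + pvDelta c
        (st.1 ++ [d], d))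
      (ps ++ [d], d)).1 = (ps ++ [d]) ++ pvScan cs d := by
  induction cs with
  | nil => intro ps d; simp [pvScan]
  | cons c cs ih =>
    intro ps d
    simp only [List.foldl_cons, pvScan]
    have := ih (ps ++ [d]) (d + pvDelta c)
    simp only [List.append_assoc] at this ⊢
    exact this

theorem pvFilterB_eq_go (cs : List Char) : ∀ (i d : Int),
    (PySem.List.enumerate (cs.zip (d :: pvScan cs d)) i).filterMap
      (fun p => if p.2.1 = '|' ∧ p.2.2 = 0 then some p.1 else none)
      = pvGo cs i d := by
  induction cs with
  | nil => intro i d; simp [PySem.List.enumerate_nil, pvGo]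
  | cons c cs ih =>
    intro i d
    simp only [pvScan, List.zip_cons_cons, PySem.List.enumerate_cons, List.filterMap_cons, pvGo]
    by_cases h1 : c = '['
    · have : ¬ (c = '|' ∧ d = 0) := by simp [h1]
      simp only [this, if_neg this]
      have hd : d + pvDelta c = d + 1 := by simp [pvDelta, h1]
      rw [hd] at *
      simpa [h1, hd] using ih (i+1) (d+1)
    · by_cases h2 : c = ']'
      · have : ¬ (c = '|' ∧ d = 0) := by subst h2; simp
        have hd : d + pvDelta c = d - 1 := by unfold pvDelta; rw [if_neg h1, if_pos h2]; ring
        simp only [if_neg this, hd]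
        simpa [h1, h2] using ih (i+1) (d-1)
      · have hd : d + pvDelta c = d := by simp [pvDelta, h1, h2]
        by_cases h3 : c = '|' ∧ d = 0
        · obtain ⟨hc, hd0⟩ := h3
          subst hc hd0
          simp [pvDelta, ih]
        · simp [h1, h2, h3, hd, ih]

-- ===== VERDICT (by name: the statement is the Claim_ definition above) =====
theorem pipe_positions_at_depth_zero_py_spec : Claim_equal_pipe_positions_at_depth_zero_py := by
  intro line _
  unfold Spec_pipe_positions_at_depth_zero_py pipe_positions_at_depth_zero_py
    pipe_positions_at_depth_zero_py_alt
  rw [pvFoldA_eq_go line.toList [] 0 0]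
  have hB := pvFoldB_eq_scan line.toList [] 0
  simp only [List.nil_append] at hB
  simp only [hB, List.singleton_append]
  rw [pvFilterB_eq_go line.toList 0 0]
  simp
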